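-- pv_equiv track=rewrite | github.com/Ace1928/eidosian_forge | agent_forge/src/agent_forge/core/workspace.py | _ignition_bursts
-- ===== SOURCE A (Python) =====
-- from typing import Any, Dict, Iterable, List, Mapping, Optional, Sequence, Set
--
-- def _ignition_bursts(
--     windows: Sequence[Mapping[str, Any]], min_sources: int
-- ) -> Dict[str, Any]:
--     bursts = 0
--     max_burst = 0
--     current = 0
--     for win in windows:
--         source_count = len(set(win.get("sources") or []))
--         if source_count >= min_sources:
--             current += 1
--             max_burst = max(max_burst, current)
--             continue
--         if current > 0:
--             bursts += 1
--             current = 0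
--     if current > 0:
--         bursts += 1
--     return {
--         "ignition_burst_count": int(bursts),
--         "max_ignition_burst": int(max_burst),
--     }
-- ===== SOURCE B (Python) =====
-- from itertools import groupby
-- from typing import Any, Dict, Mapping, Sequence
--
--
-- def _ignition_bursts(
--     windows: Sequence[Mapping[str, Any]], min_sources: int
-- ) -> Dict[str, Any]:
--     flags = [len(set(win.get("sources") or [])) >= min_sources for win in windows]
--     runs = [sum(1 for _ in grp) for key, grp in groupby(flags) if key]
--     return {
--         "ignition_burst_count": int(len(runs)),
--         "max_ignition_burst": int(max(runs, default=0)),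
--     }
-- ===== Notes on version B (the rewrite author's own statement) =====
-- stated objective: simpler
-- what changed: Replaces the hand-rolled bursts/max_burst/current state machine (with its trailing-run fixup) by precomputing the per-window ignition flags and grouping them with itertools.groupby, so count and max are just len and max over the run lengths.
import Mathlib
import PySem

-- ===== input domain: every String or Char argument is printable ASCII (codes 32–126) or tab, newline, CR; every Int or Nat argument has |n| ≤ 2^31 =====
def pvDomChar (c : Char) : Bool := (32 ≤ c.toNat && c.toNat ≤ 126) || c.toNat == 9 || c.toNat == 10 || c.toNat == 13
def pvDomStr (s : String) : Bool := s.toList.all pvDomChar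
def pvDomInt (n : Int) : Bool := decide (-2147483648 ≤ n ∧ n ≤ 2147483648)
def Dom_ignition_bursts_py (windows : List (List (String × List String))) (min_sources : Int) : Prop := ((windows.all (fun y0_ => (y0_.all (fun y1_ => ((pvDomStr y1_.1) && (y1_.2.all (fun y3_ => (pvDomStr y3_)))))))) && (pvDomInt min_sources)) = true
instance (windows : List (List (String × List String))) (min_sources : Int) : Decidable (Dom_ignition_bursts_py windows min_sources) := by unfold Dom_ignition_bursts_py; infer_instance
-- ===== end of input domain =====

-- B replaces A's bursts/max_burst/current state machine by per-window flags grouped into run lengths (groupby-style); same O(n) cost, plainer decomposition.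

-- ===== PORT A =====
-- 'win.get("sources") or []' : a missing key gives None→[], a present empty list stays [] — exactly Dict.getD with default [].
def ignition_bursts_py (windows : List (List (String × List String))) (min_sources : Int) : List (String × Int) :=
  let st : Int × Int × Int := windows.foldl (fun s win =>
      let source_count : Int :=
        Int.ofNat (PySem.Set.ofList ((PySem.Dict.mk win).getD "sources" [])).length
      if min_sources ≤ source_count then
        (s.1, max s.2.1 (s.2.2 + 1), s.2.2 + 1)
      else if s.2.2 > 0 then
        (s.1 + 1, s.2.1, (0 : Int))
      else
        (s.1, s.2.1, (0 : Int))) (0, 0, 0)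
  let bursts : Int := if st.2.2 > 0 then st.1 + 1 else st.1
  [("ignition_burst_count", bursts), ("max_ignition_burst", st.2.1)]

-- ===== PORT B =====
-- the per-window ignition flag (the list comprehension 'flags' in Source B)
def pvFlag (min_sources : Int) (win : List (String × List String)) : Bool :=
  decide (min_sources ≤ Int.ofNat (PySem.Set.ofList ((PySem.Dict.mk win).getD "sources" [])).length)

-- run lengths of the True groups of the flag list: port of
-- '[sum(1 for _ in grp) for key, grp in groupby(flags) if key]' (cur = length of the current open True run)
def pvRuns : List Bool → Int → List Int
  | [], cur => if cur > 0 then [cur] else []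
  | true :: t, cur => pvRuns t (cur + 1)
  | false :: t, cur => if cur > 0 then cur :: pvRuns t 0 else pvRuns t 0

def ignition_bursts_py_alt (windows : List (List (String × List String))) (min_sources : Int) : List (String × Int) :=
  let runs := pvRuns (windows.map (pvFlag min_sources)) 0
  [("ignition_burst_count", (runs.length : Int)), ("max_ignition_burst", runs.foldl max 0)]

-- ===== PRECONDITION & SPEC =====
def Spec_ignition_bursts_py (windows : List (List (String × List String))) (min_sources : Int) (out : List (String × Int)) : Prop := out = ignition_bursts_py_alt windows min_sources
instance (windows : List (List (String × List String))) (min_sources : Int) (out : List (String × Int)) : Decidable (Spec_ignition_bursts_py windows min_sources out) := by unfold Spec_ignition_bursts_py; infer_instance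

-- ===== CLAIM (what is proved, stated in full; the proofs are below) =====
def Claim_equal_ignition_bursts_py : Prop := ∀ (windows : List (List (String × List String))) (min_sources : Int), Dom_ignition_bursts_py windows min_sources → Spec_ignition_bursts_py windows min_sources (ignition_bursts_py windows min_sources)

-- ===== LEMMAS AND PROOFS =====

-- A's loop body, as a function of the boolean flag
def pvStep (s : Int × Int × Int) (flag : Bool) : Int × Int × Int :=
  if flag then (s.1, max s.2.1 (s.2.2 + 1), s.2.2 + 1)
  else if s.2.2 > 0 then (s.1 + 1, s.2.1, 0)
  else (s.1, s.2.1, 0)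

lemma pv_le_foldl_max : ∀ (l : List Int) (a : Int), a ≤ l.foldl max a := by
  intro l
  induction l with
  | nil => intro a; exact le_refl a
  | cons h t ih =>
    intro a
    exact le_trans (le_max_left a h) (ih (max a h))

lemma pv_foldl_max_shift : ∀ (l : List Int) (a b : Int), l.foldl max (max a b) = max a (l.foldl max b) := by
  intro l
  induction l with
  | nil => intro a b; rfl
  | cons h t ih =>
    intro a b
    simp only [List.foldl_cons, max_assoc, ih]

lemma pv_le_maxRuns : ∀ (t : List Bool) (c : Int), 0 < c → c ≤ (pvRuns t c).foldl max 0 := by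
  intro t
  induction t with
  | nil =>
    intro c hc
    simp only [pvRuns, if_pos hc, List.foldl_cons, List.foldl_nil]
    exact le_max_right 0 c
  | cons h t ih =>
    intro c hc
    cases h with
    | true =>
      have := ih (c + 1) (by omega)
      simp only [pvRuns]
      omega
    | false =>
      simp only [pvRuns, if_pos hc, List.foldl_cons]
      rw [pv_foldl_max_shift]
      have := pv_le_foldl_max (pvRuns t 0) c
      omega

lemma pv_main : ∀ (fs : List Bool) (b m c : Int), 0 ≤ c → c ≤ m →
    ((fs.foldl pvStep (b, m, c)).1 + (if (fs.foldl pvStep (b, m, c)).2.2 > 0 then 1 else 0)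
      = b + ((pvRuns fs c).length : Int))
    ∧ (fs.foldl pvStep (b, m, c)).2.1 = max m ((pvRuns fs c).foldl max 0) := by
  intro fs
  induction fs with
  | nil =>
    intro b m c hc hcm
    constructor
    · simp only [List.foldl_nil, pvRuns]
      split_ifs with h
      · simp
      · simp
    · simp only [List.foldl_nil, pvRuns]
      split_ifs with h
      · simp only [List.foldl_cons, List.foldl_nil]
        omega
      · simp only [List.foldl_nil]
        omega
  | cons f t ih =>
    intro b m c hc hcm
    cases f with
    | true =>
      have h1 : (0 : Int) ≤ c + 1 := by omega
      have h2 : c + 1 ≤ max m (c + 1) := le_max_right m (c + 1)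
      have IH := ih b (max m (c + 1)) (c + 1) h1 h2
      have hstep : pvStep (b, m, c) true = (b, max m (c + 1), c + 1) := rfl
      simp only [List.foldl_cons, hstep, pvRuns] at *
      refine ⟨IH.1, ?_⟩
      rw [IH.2]
      have hle := pv_le_maxRuns t (c + 1) (by omega)
      omega
    | false =>
      by_cases hcz : c > 0
      · have hstep : pvStep (b, m, c) false = (b + 1, m, 0) := by
          simp [pvStep, hcz]
        have IH := ih (b + 1) m 0 (le_refl 0) (by omega)
        simp only [List.foldl_cons, hstep, pvRuns, if_pos hcz] at *
        constructor
        · rw [IH.1]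
          simp only [List.length_cons]
          push_cast
          ring
        · rw [IH.2, max_comm (0 : Int) c, pv_foldl_max_shift]
          have h0' : (0 : Int) ≤ (pvRuns t 0).foldl max 0 := pv_le_foldl_max (pvRuns t 0) 0
          omega
      · have hc0 : c = 0 := by omega
        subst hc0
        have hstep : pvStep (b, m, 0) false = (b, m, 0) := by
          simp [pvStep]
        have IH := ih b m 0 (le_refl 0) (by omega)
        simp only [List.foldl_cons, hstep, pvRuns, if_neg hcz] at *
        exact IH

lemma pv_fold_bridge (windows : List (List (String × List String))) (min_sources : Int) (init : Int × Int × Int) :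
    windows.foldl (fun s win =>
      let source_count : Int :=
        Int.ofNat (PySem.Set.ofList ((PySem.Dict.mk win).getD "sources" [])).length
      if min_sources ≤ source_count then
        (s.1, max s.2.1 (s.2.2 + 1), s.2.2 + 1)
      else if s.2.2 > 0 then
        (s.1 + 1, s.2.1, (0 : Int))
      else
        (s.1, s.2.1, (0 : Int))) init
    = (windows.map (pvFlag min_sources)).foldl pvStep init := by
  rw [List.foldl_map]
  congr 1
  funext s win
  simp only [pvStep, pvFlag, decide_eq_true_eq]

-- ===== VERDICT (by name: the statement is the Claim_ definition above) =====
theorem ignition_bursts_py_spec : Claim_equal_ignition_bursts_py := by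
  intro windows min_sources _
  unfold Spec_ignition_bursts_py ignition_bursts_py ignition_bursts_py_alt
  simp only [pv_fold_bridge]
  set fs := windows.map (pvFlag min_sources) with hfs
  have H := pv_main fs 0 0 0 (le_refl 0) (le_refl 0)
  obtain ⟨H1, H2⟩ := H
  have h0' : (0 : Int) ≤ (pvRuns fs 0).foldl max 0 := pv_le_foldl_max (pvRuns fs 0) 0
  have hmax : max 0 ((pvRuns fs 0).foldl max 0) = (pvRuns fs 0).foldl max 0 := max_eq_right h0'
  rw [H2, hmax]
  have hcount : (if (List.foldl pvStep (0, 0, 0) fs).2.2 > 0 then (List.foldl pvStep (0, 0, 0) fs).1 + 1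
      else (List.foldl pvStep (0, 0, 0) fs).1) = ((pvRuns fs 0).length : Int) := by
    split_ifs at H1 ⊢ with h <;> omega
  rw [hcount]
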